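-- pv_equiv track=rewrite | github.com/SalemMohamed1124/Vault-Scan | backend/scripts/chk_05_lfi.py | _prioritise_params
-- ===== SOURCE A (Python) =====
-- from typing import Dict, List, Optional, Tuple
--
-- FILE_PARAM_NAMES = {
--     "file", "path", "page", "include", "doc", "document", "folder", "root",
--     "pg", "style", "pdf", "template", "php_path", "name", "url", "dir",
--     "show", "nav", "site", "load", "read", "content", "layout", "mod",
--     "conf",
-- }
--
-- def _prioritise_params(params: Dict[str, List[str]]) -> List[Tuple[str, str]]:
--     """
--     Sort parameters so file-like names come first.
--     Returns list of (param_name, original_value).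
--     """
--     priority = []
--     others = []
--     for name, values in params.items():
--         val = values[0] if values else ""
--         if name.lower() in FILE_PARAM_NAMES:
--             priority.append((name, val))
--         else:
--             others.append((name, val))
--     return priority + others
-- ===== SOURCE B (Python) =====
-- FILE_PARAM_NAMES = {
--     "file", "path", "page", "include", "doc", "document", "folder", "root",
--     "pg", "style", "pdf", "template", "php_path", "name", "url", "dir",
--     "show", "nav", "site", "load", "read", "content", "layout", "mod",
--     "conf",
-- }
--
-- def _prioritise_params(params):
--     pairs = [(name, values[0] if values else "") for name, values in params.items()]
--     return sorted(pairs, key=lambda kv: 0 if kv[0].lower() in FILE_PARAM_NAMES else 1)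
-- ===== Notes on version B (the rewrite author's own statement) =====
-- stated objective: idiomatic
-- what changed: Replaces the explicit two-bucket partition-and-concatenate loop with one comprehension building the (name, first-value) pairs and a single stable sort by a binary key (0 for file-like names, 1 otherwise); stability keeps insertion order within each group.
import Mathlib
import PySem

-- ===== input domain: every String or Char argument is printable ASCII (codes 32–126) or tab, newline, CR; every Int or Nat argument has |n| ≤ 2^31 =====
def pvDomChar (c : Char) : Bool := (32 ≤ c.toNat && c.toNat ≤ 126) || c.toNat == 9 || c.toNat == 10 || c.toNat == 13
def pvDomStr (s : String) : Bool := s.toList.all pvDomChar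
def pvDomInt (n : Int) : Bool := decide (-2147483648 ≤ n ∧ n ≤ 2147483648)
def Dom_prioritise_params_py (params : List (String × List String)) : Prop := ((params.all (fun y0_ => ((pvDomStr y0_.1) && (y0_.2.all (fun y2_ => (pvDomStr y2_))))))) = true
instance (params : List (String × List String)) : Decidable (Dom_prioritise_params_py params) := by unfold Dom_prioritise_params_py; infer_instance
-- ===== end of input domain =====

-- B replaces A's two-bucket partition loop with one map pass and a single stable
-- sort by a binary key (idiomatic; stability keeps insertion order per group).

-- shared module constant FILE_PARAM_NAMES (a Python set of strings)
def pvFileParamNames : PySem.Set String := PySem.Set.ofList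
  ["file", "path", "page", "include", "doc", "document", "folder", "root",
   "pg", "style", "pdf", "template", "php_path", "name", "url", "dir",
   "show", "nav", "site", "load", "read", "content", "layout", "mod",
   "conf"]

-- 'values[0] if values else ""'
def pvVal (vs : List String) : String :=
  match vs with
  | [] => ""
  | v :: _ => v

-- ===== PORT A =====
def prioritise_params_py (params : List (String × List String)) : List (String × String) :=
  let st := params.foldl
    (fun (st : List (String × String) × List (String × String)) nv =>
      let v := pvVal nv.2
      if PySem.Set.contains pvFileParamNames (PySem.Str.lower nv.1) then
        (st.1 ++ [(nv.1, v)], st.2)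
      else
        (st.1, st.2 ++ [(nv.1, v)]))
    ([], [])
  st.1 ++ st.2

-- ===== PORT B =====
def prioritise_params_py_alt (params : List (String × List String)) : List (String × String) :=
  let pairs := params.map (fun nv => (nv.1, pvVal nv.2))
  PySem.List.sorted pairs
    (fun kv => if PySem.Set.contains pvFileParamNames (PySem.Str.lower kv.1) then (0 : Int) else 1)

-- ===== PRECONDITION & SPEC =====
def Spec_prioritise_params_py (params : List (String × List String)) (out : List (String × String)) : Prop := out = prioritise_params_py_alt params
instance (params : List (String × List String)) (out : List (String × String)) : Decidable (Spec_prioritise_params_py params out) := by unfold Spec_prioritise_params_py; infer_instance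

-- ===== CLAIM (what is proved, stated in full; the proofs are below) =====
def Claim_equal_prioritise_params_py : Prop := ∀ (params : List (String × List String)), Dom_prioritise_params_py params → Spec_prioritise_params_py params (prioritise_params_py params)

-- ===== LEMMAS AND PROOFS =====

-- the file-likeness test on an output pair
def pvIsFile (kv : String × String) : Bool :=
  PySem.Set.contains pvFileParamNames (PySem.Str.lower kv.1)

def pvKey (kv : String × String) : Int := if pvIsFile kv then 0 else 1

def pvBef (a b : String × String) : Bool := decide (pvKey a < pvKey b)

lemma pvBef_of_file {a : String × String} (b : String × String) (ha : pvIsFile a = true) :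
    pvBef a b = (!pvIsFile b) := by
  simp [pvBef, pvKey, ha]
  by_cases hb : pvIsFile b = true <;> simp [hb]

lemma pvBef_of_not_file {a : String × String} (b : String × String) (ha : pvIsFile a = false) :
    pvBef a b = false := by
  simp [pvBef, pvKey, ha]
  by_cases hb : pvIsFile b = true <;> simp [hb]

-- inserting a file-like element lands at the end of the file-like block
lemma insertBy_file (x : String × String) (hx : pvIsFile x = true) :
    ∀ (P O : List (String × String)),
      (∀ y ∈ P, pvIsFile y = true) → (∀ y ∈ O, pvIsFile y = false) →
      PySem.List.insertBy pvBef x (P ++ O) = (P ++ [x]) ++ O := by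
  intro P
  induction P with
  | nil =>
    intro O _ hO
    cases O with
    | nil => simp [PySem.List.insertBy]
    | cons y ys =>
      have : pvBef x y = true := by
        rw [pvBef_of_file y hx, hO y (by simp)]; rfl
      simp [PySem.List.insertBy, this]
  | cons p ps ih =>
    intro O hP hO
    have : pvBef x p = false := by
      rw [pvBef_of_file p hx, hP p (by simp)]; rfl
    simp only [List.cons_append, PySem.List.insertBy, this, Bool.false_eq_true, if_false]
    rw [ih O (fun y hy => hP y (by simp [hy])) hO]

-- inserting a non-file element lands at the very end
lemma insertBy_other (x : String × String) (hx : pvIsFile x = false)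
    (l : List (String × String)) :
    PySem.List.insertBy pvBef x l = l ++ [x] :=
  PySem.List.insertBy_of_forall_not_before _ _ _ (fun y _ => pvBef_of_not_file y hx)

-- the insertion-sort fold keeps the two blocks, appending each element to its block
lemma foldl_insertBy_blocks :
    ∀ (l P O : List (String × String)),
      (∀ y ∈ P, pvIsFile y = true) → (∀ y ∈ O, pvIsFile y = false) →
      l.foldl (fun acc x => PySem.List.insertBy pvBef x acc) (P ++ O)
        = (P ++ l.filter pvIsFile) ++ (O ++ l.filter (fun kv => !pvIsFile kv)) := by
  intro l
  induction l with
  | nil => intro P O _ _; simp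
  | cons x xs ih =>
    intro P O hP hO
    by_cases hx : pvIsFile x = true
    · simp only [List.foldl_cons, insertBy_file x hx P O hP hO]
      have := ih (P ++ [x]) O
        (by intro y hy; rcases List.mem_append.mp hy with h | h
            · exact hP y h
            · simp at h; subst h; exact hx) hO
      rw [this]
      simp [hx]
    · have hx' : pvIsFile x = false := by simpa using hx
      simp only [List.foldl_cons, ← List.append_assoc, insertBy_other x hx']
      rw [List.append_assoc P O [x]]
      have := ih P (O ++ [x]) hP
        (by intro y hy; rcases List.mem_append.mp hy with h | h
            · exact hO y h
            · simp at h; subst h; exact hx')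
      rw [this]
      simp [hx']

-- A's fold with two accumulators is filter-then-filter on the mapped list
lemma foldl_partition :
    ∀ (l : List (String × List String)) (P O : List (String × String)),
      l.foldl
        (fun (st : List (String × String) × List (String × String)) nv =>
          let v := pvVal nv.2
          if PySem.Set.contains pvFileParamNames (PySem.Str.lower nv.1) then
            (st.1 ++ [(nv.1, v)], st.2)
          else
            (st.1, st.2 ++ [(nv.1, v)]))
        (P, O)
        = (P ++ (l.map (fun nv => (nv.1, pvVal nv.2))).filter pvIsFile,
           O ++ (l.map (fun nv => (nv.1, pvVal nv.2))).filter (fun kv => !pvIsFile kv)) := by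
  intro l
  induction l with
  | nil => intro P O; simp
  | cons x xs ih =>
    intro P O
    by_cases hx : PySem.Set.contains pvFileParamNames (PySem.Str.lower x.1) = true
    · simp only [List.foldl_cons, hx, if_true, ih, List.map_cons, List.filter_cons]
      have : pvIsFile (x.1, pvVal x.2) = true := hx
      simp [this]
    · have hx' : PySem.Set.contains pvFileParamNames (PySem.Str.lower x.1) = false := by simpa using hx
      simp only [List.foldl_cons, hx', Bool.false_eq_true, if_false, ih, List.map_cons, List.filter_cons]
      have : pvIsFile (x.1, pvVal x.2) = false := hx'
      simp [this]

-- ===== VERDICT (by name: the statement is the Claim_ definition above) =====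
theorem prioritise_params_py_spec : Claim_equal_prioritise_params_py := by
  intro params _
  unfold Spec_prioritise_params_py prioritise_params_py prioritise_params_py_alt
  rw [foldl_partition params [] []]
  have hkey : (fun kv : String × String =>
      if PySem.Set.contains pvFileParamNames (PySem.Str.lower kv.1) then (0 : Int) else 1) = pvKey := by
    funext kv; rfl
  rw [hkey, PySem.List.sorted_eq_foldl_insertBy]
  have hbef : (fun a b : String × String => decide (pvKey a < pvKey b)) = pvBef := rfl
  rw [hbef]
  have := foldl_insertBy_blocks (params.map (fun nv => (nv.1, pvVal nv.2))) [] []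
    (by simp) (by simp)
  simpa using this.symm
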